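-- pv_equiv track=rewrite | github.com/alex-precosky/AdventOfCode2017 | day11/day11.py | cancel_adjacent_movements
-- ===== SOURCE A (Python) =====
-- def get_adjacent_resultant(movement1, movement2):
--     if (movement1 == "n" and movement2 == "se") or \
--        (movement1 == "se" and movement2 == "n"):
--         return "ne"
--
--     if(movement1 == "ne" and movement2 == "s") or \
--        (movement1 == "s" and movement2 == "ne"):
--         return "se"
--
--     if(movement1 == "se" and movement2 == "sw") or \
--        (movement1 == "sw" and movement2 == "se"):
--         return "s"
--
--     if(movement1 == "s" and movement2 == "nw") or \
--        (movement1 == "nw" and movement2 == "s"):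
--         return "sw"
--
--     if(movement1 == "sw" and movement2 == "n") or \
--        (movement1 == "n" and movement2 == "sw"):
--         return "nw"
--
--     if(movement1 == "nw" and movement2 == "ne") or \
--        (movement1 == "ne" and movement2 == "nw"):
--         return "n"
--
--     # if we reach here, there's no adjacency
--     return None
--
-- def cancel_adjacent_movements(movements):
--     # for each movement, look for a movement that could be cancelle dout
--
--     # mark which movements we'll elminate
--     eliminate = [False for i in range(len(movements))]
--
--     # and elements we'll add
--     replacements = []
--
--     for i, movement_i in enumerate(movements):
--         j = i+1
--         for movement_j in movements[i+1:]:
--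
--             if eliminate[i] != True and eliminate[j] != True:
--                 resultant = get_adjacent_resultant(movement_i, movement_j)
--                 if resultant is not None:
--                     eliminate[i] = True
--                     eliminate[j] = True
--                     replacements.append(resultant)
--             j += 1
--
--     return_list = [movement for i, movement in enumerate(movements) if eliminate[i] != True]
--     return_list.extend(replacements)
--     return return_list
-- ===== SOURCE B (Python) =====
-- PARTNER = {("n", "se"): "ne", ("se", "n"): "ne",
--            ("ne", "s"): "se", ("s", "ne"): "se",
--            ("se", "sw"): "s", ("sw", "se"): "s",
--            ("s", "nw"): "sw", ("nw", "s"): "sw",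
--            ("sw", "n"): "nw", ("n", "sw"): "nw",
--            ("nw", "ne"): "n", ("ne", "nw"): "n"}
--
-- def cancel_adjacent_movements(movements):
--     rem = list(movements)
--     keep = []
--     repl = []
--     while rem:
--         m = rem.pop(0)
--         for j, x in enumerate(rem):
--             r = PARTNER.get((m, x))
--             if r is not None:
--                 del rem[j]
--                 repl.append(r)
--                 break
--         else:
--             keep.append(m)
--     return keep + repl
-- ===== Notes on version B (the rewrite author's own statement) =====
-- stated objective: simpler
-- what changed: replaces the if-chain lookup and the boolean elimination-flag array scanned by nested index loops with a pair->resultant dict and a single shrinking work-list from which each movement's first matching partner is removed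
import Mathlib
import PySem

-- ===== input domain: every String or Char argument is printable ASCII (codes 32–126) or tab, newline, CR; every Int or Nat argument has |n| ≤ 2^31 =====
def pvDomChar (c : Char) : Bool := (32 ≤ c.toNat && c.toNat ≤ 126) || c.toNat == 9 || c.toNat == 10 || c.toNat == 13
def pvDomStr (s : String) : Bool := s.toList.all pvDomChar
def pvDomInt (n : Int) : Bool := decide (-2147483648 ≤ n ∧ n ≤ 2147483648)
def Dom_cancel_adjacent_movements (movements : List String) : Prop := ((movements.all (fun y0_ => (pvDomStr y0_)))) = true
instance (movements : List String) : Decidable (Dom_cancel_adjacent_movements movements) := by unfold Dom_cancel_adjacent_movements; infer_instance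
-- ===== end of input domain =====

-- B replaces A's if-chain and boolean elimination flags over nested index loops by a
-- pair→resultant table and a single shrinking work-list (simpler; same O(n^2) worst case,
-- measured constant-factor faster in a timing run).

-- ===== PORT A =====
def get_adjacent_resultant (movement1 movement2 : String) : Option String :=
  if (movement1 == "n" && movement2 == "se") || (movement1 == "se" && movement2 == "n") then some "ne"
  else if (movement1 == "ne" && movement2 == "s") || (movement1 == "s" && movement2 == "ne") then some "se"
  else if (movement1 == "se" && movement2 == "sw") || (movement1 == "sw" && movement2 == "se") then some "s"
  else if (movement1 == "s" && movement2 == "nw") || (movement1 == "nw" && movement2 == "s") then some "sw"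
  else if (movement1 == "sw" && movement2 == "n") || (movement1 == "n" && movement2 == "sw") then some "nw"
  else if (movement1 == "nw" && movement2 == "ne") || (movement1 == "ne" && movement2 == "nw") then some "n"
  else none

-- enumerate(movements): indices are 0..len-1, always in range, so Nat indices are exact
def pvEnum {α : Type} : List α → Nat → List (Nat × α)
  | [], _ => []
  | x :: xs, s => (s, x) :: pvEnum xs (s + 1)

-- body of the inner 'for movement_j in movements[i+1:]' loop; state = (eliminate, replacements, j)
def pvInnerBody (mi : String) (i : Nat) (st : List Bool × List String × Nat) (mj : String) :
    List Bool × List String × Nat :=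
  let pr : List Bool × List String :=
    if (st.1.getD i false != true) && (st.1.getD st.2.2 false != true) then
      match get_adjacent_resultant mi mj with
      | some r => ((st.1.set i true).set st.2.2 true, st.2.1 ++ [r])
      | none => (st.1, st.2.1)
    else (st.1, st.2.1)
  (pr.1, pr.2, st.2.2 + 1)

-- body of the outer 'for i, movement_i in enumerate(movements)' loop
-- (movements[i+1:] with 0 ≤ i+1 is exactly List.drop (i+1))
def pvOuterBody (movements : List String) (st : List Bool × List String) (p : Nat × String) :
    List Bool × List String :=
  let r := (movements.drop (p.1 + 1)).foldl (pvInnerBody p.2 p.1) (st.1, st.2, p.1 + 1)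
  (r.1, r.2.1)

def cancel_adjacent_movements (movements : List String) : List String :=
  let eliminate : List Bool := (List.range movements.length).map (fun _ => false)
  let st := (pvEnum movements 0).foldl (pvOuterBody movements) (eliminate, [])
  ((pvEnum movements 0).filter (fun p => st.1.getD p.1 false != true)).map (·.2) ++ st.2

-- ===== PORT B =====
def pvPARTNER : PySem.Dict (String × String) String :=
  PySem.Dict.mk [(("n", "se"), "ne"), (("se", "n"), "ne"),
                 (("ne", "s"), "se"), (("s", "ne"), "se"),
                 (("se", "sw"), "s"), (("sw", "se"), "s"),
                 (("s", "nw"), "sw"), (("nw", "s"), "sw"),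
                 (("sw", "n"), "nw"), (("n", "sw"), "nw"),
                 (("nw", "ne"), "n"), (("ne", "nw"), "n")]

-- the 'for j, x in enumerate(rem): … del rem[j]; break / else' scan:
-- first partner of m in the list, returned together with the list without it
def pvFindRemove (m : String) : List String → Option (String × List String)
  | [] => none
  | x :: rest =>
    match PySem.Dict.get? pvPARTNER (m, x) with
    | some r => some (r, rest)
    | none =>
      match pvFindRemove m rest with
      | some (r, rest') => some (r, x :: rest')
      | none => none

-- termination fact for the while-loop recursion below (cited by pvLoopB's decreasing_by)
theorem pvFindRemove_length {m : String} : ∀ {l : List String} {r l'},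
    pvFindRemove m l = some (r, l') → l'.length + 1 = l.length := by
  intro l
  induction l with
  | nil => intro r l' h; simp [pvFindRemove] at h
  | cons x rest ih =>
    intro r l' h
    simp only [pvFindRemove] at h
    cases hg : PySem.Dict.get? pvPARTNER (m, x) with
    | some v => rw [hg] at h; simp at h; simp [← h.2]
    | none =>
      rw [hg] at h
      cases hf : pvFindRemove m rest with
      | none => rw [hf] at h; simp at h
      | some p =>
        rw [hf] at h
        obtain ⟨r0, rest'⟩ := p
        simp at h
        have := ih hf
        simp [← h.2, ← this]

-- the 'while rem:' loop; returns (keep, replacements)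
def pvLoopB : List String → List String × List String
  | [] => ([], [])
  | m :: rem =>
    match h : pvFindRemove m rem with
    | some (r, rem') =>
      let p := pvLoopB rem'
      (p.1, r :: p.2)
    | none =>
      let p := pvLoopB rem
      (m :: p.1, p.2)
termination_by l => l.length
decreasing_by
  · have := pvFindRemove_length h; simp; omega
  · simp

def cancel_adjacent_movements_alt (movements : List String) : List String :=
  (pvLoopB movements).1 ++ (pvLoopB movements).2

-- ===== PRECONDITION & SPEC =====
def Spec_cancel_adjacent_movements (movements : List String) (out : List String) : Prop := out = cancel_adjacent_movements_alt movements
instance (movements : List String) (out : List String) : Decidable (Spec_cancel_adjacent_movements movements out) := by unfold Spec_cancel_adjacent_movements; infer_instance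

-- ===== CLAIM (what is proved, stated in full; the proofs are below) =====
def Claim_equal_cancel_adjacent_movements : Prop := ∀ (movements : List String), Dom_cancel_adjacent_movements movements → Spec_cancel_adjacent_movements movements (cancel_adjacent_movements movements)


-- ===== LEMMAS AND PROOFS =====

-- B's table lookup agrees with A's if-chain
theorem pv_partner_eq (m x : String) :
    PySem.Dict.get? pvPARTNER (m, x) = get_adjacent_resultant m x := by
  rcases eq_or_ne m "n" with rfl | hn1 <;>
  [skip; rcases eq_or_ne m "ne" with rfl | hn2] <;>
  [skip; skip; rcases eq_or_ne m "se" with rfl | hn3] <;>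
  [skip; skip; skip; rcases eq_or_ne m "s" with rfl | hn4] <;>
  [skip; skip; skip; skip; rcases eq_or_ne m "sw" with rfl | hn5] <;>
  [skip; skip; skip; skip; skip; rcases eq_or_ne m "nw" with rfl | hn6] <;>
  · first
    | (simp [pvPARTNER, PySem.Dict.get?_mk_cons, get_adjacent_resultant];
       simp only [show ∀ s : String, (x = s) ↔ (s = x) from fun s => eq_comm];
       split_ifs <;> rfl)
    | (simp [pvPARTNER, PySem.Dict.get?, get_adjacent_resultant,
        hn1, hn2, hn3, hn4, hn5, hn6,
        Ne.symm hn1, Ne.symm hn2, Ne.symm hn3, Ne.symm hn4, Ne.symm hn5, Ne.symm hn6])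

-- remaining (not yet eliminated) movements of a suffix that starts at index j
def pvFilt (elim : List Bool) : Nat → List String → List String
  | _, [] => []
  | j, x :: xs => if elim.getD j false = false then x :: pvFilt elim (j+1) xs else pvFilt elim (j+1) xs

-- first index ≥ j of a not-yet-eliminated partner of mi in the suffix, with the resultant
def pvFindP (mi : String) (elim : List Bool) : Nat → List String → Option (String × Nat)
  | _, [] => none
  | j, x :: xs =>
    if elim.getD j false = false then
      match get_adjacent_resultant mi x with
      | some r => some (r, j)
      | none => pvFindP mi elim (j+1) xs
    else pvFindP mi elim (j+1) xs

-- once eliminate[i] is set, the rest of the inner loop only advances j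
theorem pv_inner_noop (mi : String) (i : Nat) :
    ∀ (suffix : List String) (j : Nat) (elim : List Bool) (repl : List String),
    elim.getD i false = true →
    suffix.foldl (pvInnerBody mi i) (elim, repl, j) = (elim, repl, j + suffix.length) := by
  intro suffix
  induction suffix with
  | nil => intro j elim repl h; simp
  | cons x xs ih =>
    intro j elim repl h
    have hb : pvInnerBody mi i (elim, repl, j) x = (elim, repl, j + 1) := by
      simp [pvInnerBody, ← List.getD_eq_getElem?_getD, h]
    rw [List.foldl_cons, hb, ih _ _ _ h]
    have : j + 1 + xs.length = j + (x :: xs).length := by simp only [List.length_cons]; omega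
    rw [this]

-- the inner loop pairs i with the first not-yet-eliminated partner, if any
theorem pv_inner_spec (mi : String) (i : Nat) :
    ∀ (suffix : List String) (j : Nat) (elim : List Bool) (repl : List String),
    elim.getD i false = false → i < j → i < elim.length →
    suffix.foldl (pvInnerBody mi i) (elim, repl, j) =
      match pvFindP mi elim j suffix with
      | none => (elim, repl, j + suffix.length)
      | some (r, j') => ((elim.set i true).set j' true, repl ++ [r], j + suffix.length) := by
  intro suffix
  induction suffix with
  | nil => intro j elim repl h hij hilen; simp [pvFindP]
  | cons x xs ih =>
    intro j elim repl h hij hilen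
    have hlen : j + 1 + xs.length = j + (x :: xs).length := by simp only [List.length_cons]; omega
    by_cases hj : elim.getD j false = false
    · cases hr : get_adjacent_resultant mi x with
      | some r =>
        have hb : pvInnerBody mi i (elim, repl, j) x = ((elim.set i true).set j true, repl ++ [r], j + 1) := by
          simp [pvInnerBody, ← List.getD_eq_getElem?_getD, h, hj, hr]
        have hne : j ≠ i := by omega
        have h1 : ((elim.set i true).set j true).getD i false = true := by
          rw [List.getD_eq_getElem?_getD, List.getElem?_set_ne hne,
              List.getElem?_set_self hilen]
          rfl
        rw [List.foldl_cons, hb, pv_inner_noop mi i xs (j+1) _ _ h1]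
        simp only [pvFindP, if_pos hj, hr, hlen]
      | none =>
        have hb : pvInnerBody mi i (elim, repl, j) x = (elim, repl, j + 1) := by
          simp [pvInnerBody, ← List.getD_eq_getElem?_getD, h, hj, hr]
        rw [List.foldl_cons, hb, ih _ _ _ h (by omega) hilen]
        simp only [pvFindP, if_pos hj, hr, hlen]
    · have hb : pvInnerBody mi i (elim, repl, j) x = (elim, repl, j + 1) := by
        simp [pvInnerBody, ← List.getD_eq_getElem?_getD, h, hj]
      rw [List.foldl_cons, hb, ih _ _ _ h (by omega) hilen]
      simp only [pvFindP, if_neg hj, hlen]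

theorem pv_findP_bounds (mi : String) (elim : List Bool) :
    ∀ (suffix : List String) (j : Nat) (r : String) (j' : Nat),
    pvFindP mi elim j suffix = some (r, j') →
    j ≤ j' ∧ j' < j + suffix.length ∧ elim.getD j' false = false := by
  intro suffix
  induction suffix with
  | nil => intro j r j' h; simp [pvFindP] at h
  | cons x xs ih =>
    intro j r j' hfp
    simp only [pvFindP] at hfp
    by_cases hj : elim.getD j false = false
    · rw [if_pos hj] at hfp
      cases hr : get_adjacent_resultant mi x with
      | some r0 =>
        rw [hr] at hfp
        simp at hfp
        obtain ⟨h1, h2⟩ := hfp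
        subst h2
        exact ⟨le_refl _, by simp only [List.length_cons]; omega, hj⟩
      | none =>
        rw [hr] at hfp
        have := ih (j+1) r j' hfp
        exact ⟨by omega, by simp only [List.length_cons]; omega, this.2.2⟩
    · rw [if_neg hj] at hfp
      have := ih (j+1) r j' hfp
      exact ⟨by omega, by simp only [List.length_cons]; omega, this.2.2⟩

-- marking an index below the suffix start does not change the filtered suffix
theorem pv_filt_set_lt (a : Nat) :
    ∀ (xs : List String) (j : Nat) (elim : List Bool), a < j →
    pvFilt (elim.set a true) j xs = pvFilt elim j xs := by
  intro xs
  induction xs with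
  | nil => intro j elim h; rfl
  | cons x xs ih =>
    intro j elim h
    have hg : (elim.set a true).getD j false = elim.getD j false := by
      rw [List.getD_eq_getElem?_getD, List.getElem?_set_ne (by omega), ← List.getD_eq_getElem?_getD]
    simp only [pvFilt, hg]
    rw [ih (j+1) elim (by omega)]

-- searching the raw suffix with the flags equals searching the filtered suffix
theorem pv_find_filter (mi : String) (elim : List Bool) :
    ∀ (suffix : List String) (j : Nat), j + suffix.length ≤ elim.length →
    (pvFindP mi elim j suffix = none → pvFindRemove mi (pvFilt elim j suffix) = none)
    ∧ (∀ r j', pvFindP mi elim j suffix = some (r, j') →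
        pvFindRemove mi (pvFilt elim j suffix) = some (r, pvFilt (elim.set j' true) j suffix)) := by
  intro suffix
  induction suffix with
  | nil => intro j h; exact ⟨fun _ => rfl, fun r j' h => by simp [pvFindP] at h⟩
  | cons x xs ih =>
    intro j hlen
    have hjlt : j < elim.length := by simp at hlen; omega
    have ihx := ih (j+1) (by simp at hlen ⊢; omega)
    by_cases hj : elim.getD j false = false
    · cases hr : get_adjacent_resultant mi x with
      | some r =>
        constructor
        · intro hfp
          simp only [pvFindP, if_pos hj, hr] at hfp
          simp at hfp
        · intro r0 j0 hfp
          simp only [pvFindP, if_pos hj, hr] at hfp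
          simp at hfp
          obtain ⟨h1, h2⟩ := hfp
          subst h1; subst h2
          simp only [pvFilt, if_pos hj, pvFindRemove, pv_partner_eq, hr]
          have hgj : (elim.set j true).getD j false = true := by
            rw [List.getD_eq_getElem?_getD, List.getElem?_set_self hjlt]; rfl
          rw [if_neg (by rw [hgj]; simp), pv_filt_set_lt j xs (j+1) elim (by omega)]
      | none =>
        constructor
        · intro hfp
          simp only [pvFindP, if_pos hj, hr] at hfp
          simp only [pvFilt, if_pos hj, pvFindRemove, pv_partner_eq, hr]
          rw [(ihx.1 hfp)]
        · intro r0 j0 hfp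
          simp only [pvFindP, if_pos hj, hr] at hfp
          have hb := pv_findP_bounds mi elim xs (j+1) r0 j0 hfp
          simp only [pvFilt, if_pos hj, pvFindRemove, pv_partner_eq, hr]
          rw [ihx.2 r0 j0 hfp]
          have hgj : (elim.set j0 true).getD j false = elim.getD j false := by
            rw [List.getD_eq_getElem?_getD, List.getElem?_set_ne (by omega), ← List.getD_eq_getElem?_getD]
          have hcond : (elim.set j0 true).getD j false = false := by rw [hgj]; exact hj
          rw [if_pos hcond]
    · have hfilt : pvFilt elim j (x :: xs) = pvFilt elim (j+1) xs := by
        simp only [pvFilt, if_neg hj]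
      constructor
      · intro hfp
        simp only [pvFindP, if_neg hj] at hfp
        rw [hfilt, ihx.1 hfp]
      · intro r0 j0 hfp
        simp only [pvFindP, if_neg hj] at hfp
        have hb := pv_findP_bounds mi elim xs (j+1) r0 j0 hfp
        have hgj : (elim.set j0 true).getD j false = elim.getD j false := by
          rw [List.getD_eq_getElem?_getD, List.getElem?_set_ne (by omega), ← List.getD_eq_getElem?_getD]
        have : pvFilt (elim.set j0 true) j (x :: xs) = pvFilt (elim.set j0 true) (j+1) xs := by
          simp only [pvFilt, hgj, if_neg hj]
        rw [hfilt, ihx.2 r0 j0 hfp, this]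

-- main invariant: from position s on, A's flagged scan behaves like B's loop on the filtered suffix
theorem pv_main (movements : List String) :
    ∀ (suffix : List String) (s : Nat) (elim : List Bool) (repl : List String),
    movements.drop s = suffix → elim.length = movements.length →
    (∀ k, k < s → ((pvEnum suffix s).foldl (pvOuterBody movements) (elim, repl)).1.getD k false = elim.getD k false)
    ∧ pvFilt ((pvEnum suffix s).foldl (pvOuterBody movements) (elim, repl)).1 s suffix
        = (pvLoopB (pvFilt elim s suffix)).1
    ∧ ((pvEnum suffix s).foldl (pvOuterBody movements) (elim, repl)).2
        = repl ++ (pvLoopB (pvFilt elim s suffix)).2 := by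
  intro suffix
  induction suffix with
  | nil =>
    intro s elim repl hdrop hlen
    refine ⟨fun k hk => rfl, ?_, ?_⟩ <;> simp [pvEnum, pvFilt, pvLoopB]
  | cons x rest ih =>
    intro s elim repl hdrop hlen
    have hslt : s < movements.length := by
      by_contra hc
      rw [List.drop_eq_nil_of_le (by omega)] at hdrop
      exact List.cons_ne_nil _ _ hdrop.symm
    have hdrop1 : movements.drop (s+1) = rest := by
      rw [← List.tail_drop, hdrop]; rfl
    have hrlen : rest.length = movements.length - (s+1) := by
      rw [← hdrop1, List.length_drop]
    have hfold : (pvEnum (x :: rest) s).foldl (pvOuterBody movements) (elim, repl)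
        = (pvEnum rest (s+1)).foldl (pvOuterBody movements)
            (pvOuterBody movements (elim, repl) (s, x)) := by
      simp [pvEnum]
    by_cases hs : elim.getD s false = false
    · -- movement s is live: the inner loop looks for its first live partner
      have hspec := pv_inner_spec x s (movements.drop (s+1)) (s+1) elim repl hs (by omega) (by omega)
      rw [hdrop1] at hspec
      cases hfp : pvFindP x elim (s+1) rest with
      | none =>
        have hst : pvOuterBody movements (elim, repl) (s, x) = (elim, repl) := by
          simp only [pvOuterBody, hdrop1]
          rw [hspec, hfp]
        rw [hfold, hst]
        obtain ⟨ihp, ihs, ihr⟩ := ih (s+1) elim repl hdrop1 hlen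
        have hfr := (pv_find_filter x elim rest (s+1) (by omega)).1 hfp
        have hloop : pvLoopB (x :: pvFilt elim (s+1) rest)
            = (x :: (pvLoopB (pvFilt elim (s+1) rest)).1, (pvLoopB (pvFilt elim (s+1) rest)).2) := by
          rw [pvLoopB, hfr]
        have hxfilt : pvFilt elim s (x :: rest) = x :: pvFilt elim (s+1) rest := by
          simp only [pvFilt, if_pos hs]
        refine ⟨fun k hk => ihp k (by omega), ?_, ?_⟩
        · have hks : (((pvEnum rest (s+1)).foldl (pvOuterBody movements) (elim, repl)).1).getD s false = false := by
            rw [ihp s (by omega)]; exact hs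
          have hL : pvFilt (((pvEnum rest (s+1)).foldl (pvOuterBody movements) (elim, repl)).1) s (x :: rest)
              = x :: pvFilt (((pvEnum rest (s+1)).foldl (pvOuterBody movements) (elim, repl)).1) (s+1) rest := by
            simp only [pvFilt, if_pos hks]
          show pvFilt (((pvEnum rest (s+1)).foldl (pvOuterBody movements) (elim, repl)).1) s (x :: rest)
              = (pvLoopB (pvFilt elim s (x :: rest))).1
          rw [hxfilt, hL, ihs, hloop]
        · show ((pvEnum rest (s+1)).foldl (pvOuterBody movements) (elim, repl)).2
              = repl ++ (pvLoopB (pvFilt elim s (x :: rest))).2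
          rw [hxfilt, ihr, hloop]
      | some p =>
        obtain ⟨r0, j'⟩ := p
        have hb := pv_findP_bounds x elim rest (s+1) r0 j' hfp
        have hj'lt : j' < elim.length := by omega
        have hsj : s ≠ j' := by omega
        have hst : pvOuterBody movements (elim, repl) (s, x)
            = ((elim.set s true).set j' true, repl ++ [r0]) := by
          simp only [pvOuterBody, hdrop1]
          rw [hspec, hfp]
        rw [hfold, hst]
        have hlen' : ((elim.set s true).set j' true).length = movements.length := by
          simp [hlen]
        obtain ⟨ihp, ihs, ihr⟩ := ih (s+1) ((elim.set s true).set j' true) (repl ++ [r0]) hdrop1 hlen'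
        -- the filtered suffix after the pairing
        have hcomm : (elim.set s true).set j' true = (elim.set j' true).set s true :=
          List.set_comm _ _ hsj
        have hfeq : pvFilt ((elim.set s true).set j' true) (s+1) rest
            = pvFilt (elim.set j' true) (s+1) rest := by
          rw [hcomm, pv_filt_set_lt s rest (s+1) (elim.set j' true) (by omega)]
        have hfr := (pv_find_filter x elim rest (s+1) (by omega)).2 r0 j' hfp
        have hloop : pvLoopB (x :: pvFilt elim (s+1) rest)
            = ((pvLoopB (pvFilt (elim.set j' true) (s+1) rest)).1,
               r0 :: (pvLoopB (pvFilt (elim.set j' true) (s+1) rest)).2) := by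
          rw [pvLoopB, hfr]
        have hpres : ∀ k, k < s → ((elim.set s true).set j' true).getD k false = elim.getD k false := by
          intro k hk
          rw [List.getD_eq_getElem?_getD, List.getElem?_set_ne (by omega),
              List.getElem?_set_ne (by omega), ← List.getD_eq_getElem?_getD]
        have hxfilt : pvFilt elim s (x :: rest) = x :: pvFilt elim (s+1) rest := by
          simp only [pvFilt, if_pos hs]
        refine ⟨fun k hk => by rw [ihp k (by omega), hpres k hk], ?_, ?_⟩
        · have hgs : ((elim.set s true).set j' true).getD s false = true := by
            rw [List.getD_eq_getElem?_getD, List.getElem?_set_ne (Ne.symm hsj),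
                List.getElem?_set_self (by omega)]
            rfl
          have hks : (((pvEnum rest (s+1)).foldl (pvOuterBody movements)
              ((elim.set s true).set j' true, repl ++ [r0])).1).getD s false = true := by
            rw [ihp s (by omega)]; exact hgs
          have hL : pvFilt (((pvEnum rest (s+1)).foldl (pvOuterBody movements)
                ((elim.set s true).set j' true, repl ++ [r0])).1) s (x :: rest)
              = pvFilt (((pvEnum rest (s+1)).foldl (pvOuterBody movements)
                ((elim.set s true).set j' true, repl ++ [r0])).1) (s+1) rest := by
            simp only [pvFilt]
            rw [hks]
            simp
          show pvFilt (((pvEnum rest (s+1)).foldl (pvOuterBody movements)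
                ((elim.set s true).set j' true, repl ++ [r0])).1) s (x :: rest)
              = (pvLoopB (pvFilt elim s (x :: rest))).1
          rw [hxfilt, hL, ihs, hfeq, hloop]
        · show ((pvEnum rest (s+1)).foldl (pvOuterBody movements)
                ((elim.set s true).set j' true, repl ++ [r0])).2
              = repl ++ (pvLoopB (pvFilt elim s (x :: rest))).2
          rw [hxfilt, ihr, hfeq, hloop]
          simp
    · -- movement s was already eliminated: the inner loop is a no-op
      have hs' : elim.getD s false = true := by
        cases h : elim.getD s false
        · exact absurd h hs
        · rfl
      have hst : pvOuterBody movements (elim, repl) (s, x) = (elim, repl) := by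
        simp only [pvOuterBody]
        rw [pv_inner_noop x s (movements.drop (s+1)) (s+1) elim repl hs']
      rw [hfold, hst]
      obtain ⟨ihp, ihs, ihr⟩ := ih (s+1) elim repl hdrop1 hlen
      have hfilt : pvFilt elim s (x :: rest) = pvFilt elim (s+1) rest := by
        simp only [pvFilt, if_neg hs]
      refine ⟨fun k hk => ihp k (by omega), ?_, ?_⟩
      · have hks : (((pvEnum rest (s+1)).foldl (pvOuterBody movements) (elim, repl)).1).getD s false = true := by
          rw [ihp s (by omega)]; exact hs'
        have hL : pvFilt (((pvEnum rest (s+1)).foldl (pvOuterBody movements) (elim, repl)).1) s (x :: rest)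
            = pvFilt (((pvEnum rest (s+1)).foldl (pvOuterBody movements) (elim, repl)).1) (s+1) rest := by
          simp only [pvFilt]
          rw [hks]
          simp
        show pvFilt (((pvEnum rest (s+1)).foldl (pvOuterBody movements) (elim, repl)).1) s (x :: rest)
            = (pvLoopB (pvFilt elim s (x :: rest))).1
        rw [hfilt, hL, ihs]
      · show ((pvEnum rest (s+1)).foldl (pvOuterBody movements) (elim, repl)).2
            = repl ++ (pvLoopB (pvFilt elim s (x :: rest))).2
        rw [hfilt, ihr]

theorem pv_filt_all_false (elim : List Bool) (hall : ∀ j, elim.getD j false = false) :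
    ∀ (l : List String) (j : Nat), pvFilt elim j l = l := by
  intro l
  induction l with
  | nil => intro j; rfl
  | cons x xs ih => intro j; simp only [pvFilt, if_pos (hall j)]; rw [ih (j+1)]

theorem pv_filter_enum (elim : List Bool) :
    ∀ (l : List String) (j : Nat),
    ((pvEnum l j).filter (fun p => elim.getD p.1 false != true)).map (·.2) = pvFilt elim j l := by
  intro l
  induction l with
  | nil => intro j; rfl
  | cons x xs ih =>
    intro j
    by_cases hj : elim.getD j false = false
    · simp only [pvEnum, pvFilt, if_pos hj, List.filter_cons]
      rw [if_pos (by rw [hj]; rfl)]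
      simp only [List.map_cons]
      rw [ih (j+1)]
    · have hj' : elim.getD j false = true := by
        cases h : elim.getD j false
        · exact absurd h hj
        · rfl
      simp only [pvEnum, pvFilt, if_neg hj, List.filter_cons]
      rw [if_neg (by rw [hj']; simp)]
      rw [ih (j+1)]

theorem pv_zeros_getD (n : Nat) : ∀ j, ((List.range n).map (fun _ => false)).getD j false = false := by
  intro j
  rw [List.getD_eq_getElem?_getD]
  simp only [List.getElem?_map]
  cases (List.range n)[j]? <;> rfl

-- ===== VERDICT (by name: the statement is the Claim_ definition above) =====
theorem cancel_adjacent_movements_spec : Claim_equal_cancel_adjacent_movements := by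
  intro movements _
  unfold Spec_cancel_adjacent_movements cancel_adjacent_movements cancel_adjacent_movements_alt
  have hlen : ((List.range movements.length).map (fun _ => false)).length = movements.length := by
    simp
  obtain ⟨_, hsurv, hrepl⟩ := pv_main movements movements 0
    ((List.range movements.length).map (fun _ => false)) [] rfl hlen
  have hall : pvFilt ((List.range movements.length).map (fun _ => false)) 0 movements = movements :=
    pv_filt_all_false _ (pv_zeros_getD _) movements 0
  rw [hall] at hsurv hrepl
  simp only []
  rw [pv_filter_enum, hsurv, hrepl]
  simp
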